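-- pv_equiv track=rewrite | github.com/bniladridas/bniladridas.github.io | chatbot.py | get_file_category
-- ===== SOURCE A (Python) =====
-- ALLOWED_EXTENSIONS = {
--     'image': ['png', 'jpg', 'jpeg', 'gif', 'bmp', 'webp', 'tiff'],
--     'document': ['pdf', 'doc', 'docx', 'txt', 'rtf', 'odt'],
--     'data': ['csv', 'xls', 'xlsx', 'json', 'xml'],
--     'code': ['py', 'js', 'html', 'css', 'java', 'cpp', 'c', 'php', 'rb', 'go', 'ts', 'jsx', 'tsx']
-- }
--
-- def get_file_category(filename):
--     """Determine the category of the file based on its extension"""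
--     if '.' not in filename:
--         return "unknown"
--     ext = filename.rsplit('.', 1)[1].lower()
--     for category, extensions in ALLOWED_EXTENSIONS.items():
--         if ext in extensions:
--             return category
--     return "unknown"
-- ===== SOURCE B (Python) =====
-- def _categorize(ext):
--     """Map a lowercased extension to its category via a match statement."""
--     match ext:
--         case 'png' | 'jpg' | 'jpeg' | 'gif' | 'bmp' | 'webp' | 'tiff':
--             return "image"
--         case 'pdf' | 'doc' | 'docx' | 'txt' | 'rtf' | 'odt':
--             return "document"
--         case 'csv' | 'xls' | 'xlsx' | 'json' | 'xml':
--             return "data"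
--         case 'py' | 'js' | 'html' | 'css' | 'java' | 'cpp' | 'c' | 'php' | 'rb' | 'go' | 'ts' | 'jsx' | 'tsx':
--             return "code"
--         case _:
--             return "unknown"
--
-- def get_file_category(filename):
--     """Determine the category of the file based on its extension"""
--     ext_rev = []
--     for c in reversed(filename):
--         if c == '.':
--             return _categorize(''.join(reversed(ext_rev)).lower())
--         ext_rev.append(c)
--     return "unknown"
-- ===== Notes on version B (the rewrite author's own statement) =====
-- stated objective: alternative
-- what changed: B drops the ALLOWED_EXTENSIONS table and its per-category membership scan entirely: one backward scan over the filename both detects the dot and collects the extension (no 'in' test plus rsplit), and the category is decided by a direct match/case branch instead of iterating a dict of lists.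
import Mathlib
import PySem

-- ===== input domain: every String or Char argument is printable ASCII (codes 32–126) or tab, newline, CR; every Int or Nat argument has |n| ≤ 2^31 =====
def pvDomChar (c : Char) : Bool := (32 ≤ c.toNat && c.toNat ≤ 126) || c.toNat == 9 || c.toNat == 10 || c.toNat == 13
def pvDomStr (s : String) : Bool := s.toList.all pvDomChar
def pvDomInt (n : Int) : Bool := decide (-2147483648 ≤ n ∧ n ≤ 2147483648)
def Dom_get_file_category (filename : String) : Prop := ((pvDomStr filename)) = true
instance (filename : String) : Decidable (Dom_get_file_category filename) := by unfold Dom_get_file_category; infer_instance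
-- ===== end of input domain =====

-- ===== PORT A =====
-- A tests '.' in filename, rsplits, then scans the ALLOWED_EXTENSIONS table per call;
-- B makes one backward pass that finds the dot and collects the extension, then a direct match/case branch.
-- hand port of filename.rsplit('.', 1)[1] (exact when '.' occurs in filename): the suffix after the LAST '.'
def afterLastDot (filename : String) : String :=
  String.ofList (((filename.toList.reverse).takeWhile (fun c => c != '.')).reverse)

def allowedExtensions : List (String × List String) :=
  [("image", ["png", "jpg", "jpeg", "gif", "bmp", "webp", "tiff"]),
   ("document", ["pdf", "doc", "docx", "txt", "rtf", "odt"]),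
   ("data", ["csv", "xls", "xlsx", "json", "xml"]),
   ("code", ["py", "js", "html", "css", "java", "cpp", "c", "php", "rb", "go", "ts", "jsx", "tsx"])]

def catLoop : List (String × List String) → String → String
  | [], _ => "unknown"
  | (category, extensions) :: rest, ext =>
      if extensions.contains ext then category else catLoop rest ext

def get_file_category (filename : String) : String :=
  if PySem.Str.isIn "." filename = false then "unknown"
  else
    let ext := PySem.Str.lower (afterLastDot filename)
    catLoop allowedExtensions ext

-- ===== PORT B =====
-- match/case classifier: patterns tried in order, default is "unknown"
def categorize (ext : String) : String :=
  match ext with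
  | "png" | "jpg" | "jpeg" | "gif" | "bmp" | "webp" | "tiff" => "image"
  | "pdf" | "doc" | "docx" | "txt" | "rtf" | "odt" => "document"
  | "csv" | "xls" | "xlsx" | "json" | "xml" => "data"
  | "py" | "js" | "html" | "css" | "java" | "cpp" | "c" | "php" | "rb" | "go" | "ts" | "jsx" | "tsx" => "code"
  | _ => "unknown"

-- the for-loop over reversed(filename): collects ext chars until it meets '.', else falls through to "unknown"
def scanExt : List Char → List Char → String
  | [], _ => "unknown"
  | c :: rest, acc =>
      if c = '.' then categorize (PySem.Str.lower (String.ofList acc))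
      else scanExt rest (c :: acc)

def get_file_category_alt (filename : String) : String :=
  scanExt filename.toList.reverse []

-- ===== PRECONDITION & SPEC =====
def Spec_get_file_category (filename : String) (out : String) : Prop := out = get_file_category_alt filename
instance (filename : String) (out : String) : Decidable (Spec_get_file_category filename out) := by unfold Spec_get_file_category; infer_instance

-- ===== CLAIM (what is proved, stated in full; the proofs are below) =====
def Claim_equal_get_file_category : Prop := ∀ (filename : String), Dom_get_file_category filename → Spec_get_file_category filename (get_file_category filename)

-- ===== LEMMAS AND PROOFS =====
-- A's table scan agrees with B's match/case branch on every extension string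
theorem catLoop_eq_categorize (ext : String) :
    catLoop allowedExtensions ext = categorize ext := by
  by_cases h0 : ext = "png";   · subst h0; decide
  by_cases h1 : ext = "jpg";   · subst h1; decide
  by_cases h2 : ext = "jpeg";  · subst h2; decide
  by_cases h3 : ext = "gif";   · subst h3; decide
  by_cases h4 : ext = "bmp";   · subst h4; decide
  by_cases h5 : ext = "webp";  · subst h5; decide
  by_cases h6 : ext = "tiff";  · subst h6; decide
  by_cases h7 : ext = "pdf";   · subst h7; decide
  by_cases h8 : ext = "doc";   · subst h8; decide
  by_cases h9 : ext = "docx";  · subst h9; decide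
  by_cases h10 : ext = "txt";  · subst h10; decide
  by_cases h11 : ext = "rtf";  · subst h11; decide
  by_cases h12 : ext = "odt";  · subst h12; decide
  by_cases h13 : ext = "csv";  · subst h13; decide
  by_cases h14 : ext = "xls";  · subst h14; decide
  by_cases h15 : ext = "xlsx"; · subst h15; decide
  by_cases h16 : ext = "json"; · subst h16; decide
  by_cases h17 : ext = "xml";  · subst h17; decide
  by_cases h18 : ext = "py";   · subst h18; decide
  by_cases h19 : ext = "js";   · subst h19; decide
  by_cases h20 : ext = "html"; · subst h20; decide
  by_cases h21 : ext = "css";  · subst h21; decide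
  by_cases h22 : ext = "java"; · subst h22; decide
  by_cases h23 : ext = "cpp";  · subst h23; decide
  by_cases h24 : ext = "c";    · subst h24; decide
  by_cases h25 : ext = "php";  · subst h25; decide
  by_cases h26 : ext = "rb";   · subst h26; decide
  by_cases h27 : ext = "go";   · subst h27; decide
  by_cases h28 : ext = "ts";   · subst h28; decide
  by_cases h29 : ext = "jsx";  · subst h29; decide
  by_cases h30 : ext = "tsx";  · subst h30; decide
  -- ext matches none of the 31 extensions: both sides fall through to "unknown"
  have hr : categorize ext = "unknown" := by
    unfold categorize; split <;> simp_all
  rw [hr]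
  simp only [catLoop, allowedExtensions]
  simp [h0, h1, h2, h3, h4, h5, h6, h7, h8, h9, h10, h11, h12, h13, h14, h15, h16, h17, h18, h19,
        h20, h21, h22, h23, h24, h25, h26, h27, h28, h29, h30]

-- invariant of B's backward scan: either no '.' remains ("unknown"), or the collected
-- extension is the prefix of the remaining reversed chars up to the first '.', plus acc
theorem scanExt_spec (l acc : List Char) :
    scanExt l acc =
      if '.' ∈ l then
        categorize (PySem.Str.lower (String.ofList ((l.takeWhile (fun c => c != '.')).reverse ++ acc)))
      else "unknown" := by
  induction l generalizing acc with
  | nil => simp [scanExt]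
  | cons c rest ih =>
      by_cases hc : c = '.'
      · subst hc
        simp [scanExt, List.takeWhile]
      · rw [scanExt, if_neg hc, ih]
        have hm : ('.' ∈ c :: rest) ↔ ('.' ∈ rest) := by simp [hc, eq_comm]
        by_cases hd : '.' ∈ rest
        · rw [if_pos hd, if_pos (hm.mpr hd)]
          have hb : (c != '.') = true := by simp [hc]
          have : (c :: rest).takeWhile (fun c => c != '.') = c :: rest.takeWhile (fun c => c != '.') := by
            simp [List.takeWhile, hb]
          rw [this]
          simp
        · rw [if_neg hd, if_neg (fun h => hd (hm.mp h))]

-- '.' in filename ↔ '.' is a member of its char list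
theorem isIn_dot_iff (s : String) :
    PySem.Str.isIn "." s = true ↔ '.' ∈ s.toList := by
  rw [PySem.Str.isIn_iff_infix]
  simpa using List.singleton_infix_iff '.' s.toList

-- ===== VERDICT (by name: the statement is the Claim_ definition above) =====
theorem get_file_category_spec : Claim_equal_get_file_category := by
  intro filename _
  unfold Spec_get_file_category get_file_category get_file_category_alt
  rw [scanExt_spec]
  by_cases h : '.' ∈ filename.toList
  · have ht : PySem.Str.isIn "." filename = true := (isIn_dot_iff filename).mpr h
    rw [if_neg (by rw [ht]; decide), if_pos (by simpa using h)]
    simp [afterLastDot, catLoop_eq_categorize]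
  · have h2 : PySem.Str.isIn "." filename = false := by
      rw [← Bool.not_eq_true, isIn_dot_iff]; exact h
    rw [if_pos h2, if_neg (by simpa using h)]
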